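-- pv_equiv track=rewrite | github.com/MoonFlowww/GKG | ast_mapper.py | _depth0_text
-- ===== SOURCE A (Python) =====
-- def _depth0_text(text: str) -> str:
--     """Strip all nested {…} content — return only depth-0 characters."""
--     out: list[str] = []
--     depth = 0
--     for c in text:
--         if c == '{':
--             depth += 1
--         elif c == '}':
--             depth -= 1
--         elif depth == 0:
--             out.append(c)
--     return ''.join(out)
-- ===== SOURCE B (Python) =====
-- def _depth0_text(text: str) -> str:
--     """Strip all nested {…} content — return only depth-0 characters."""
--     pieces = []
--     i, n = 0, len(text)
--     while i < n:
--         # copy the maximal brace-free run starting at i as one slice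
--         j = i
--         while j < n and text[j] != '{' and text[j] != '}':
--             j += 1
--         pieces.append(text[i:j])
--         if j == n:
--             break
--         # skip the brace-delimited region: consume braces until balance is 0 again
--         bal = 1 if text[j] == '{' else -1
--         j += 1
--         while j < n and bal != 0:
--             if text[j] == '{':
--                 bal += 1
--             elif text[j] == '}':
--                 bal -= 1
--             j += 1
--         i = j
--     return ''.join(pieces)
-- ===== Notes on version B (the rewrite author's own statement) =====
-- stated objective: alternative
-- what changed: Replaces A's single per-character depth-counting loop with a segment-based scanner: it repeatedly copies whole brace-free runs as slices and, on hitting a brace, enters a separate skip loop that consumes the brace-delimited region until balance returns to 0.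
import Mathlib
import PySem

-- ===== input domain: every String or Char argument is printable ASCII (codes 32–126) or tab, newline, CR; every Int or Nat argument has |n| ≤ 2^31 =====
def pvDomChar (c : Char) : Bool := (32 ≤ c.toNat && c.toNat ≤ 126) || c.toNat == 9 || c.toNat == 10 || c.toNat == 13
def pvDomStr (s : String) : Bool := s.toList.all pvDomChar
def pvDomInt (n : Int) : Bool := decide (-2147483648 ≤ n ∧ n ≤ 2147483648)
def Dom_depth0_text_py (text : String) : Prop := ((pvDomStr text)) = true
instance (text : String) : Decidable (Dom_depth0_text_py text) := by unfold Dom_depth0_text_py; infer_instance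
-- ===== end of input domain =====

-- B replaces A's per-character depth loop by a segment scanner: copy brace-free runs, skip brace-delimited regions (alternative decomposition, same cost).

-- ===== PORT A =====
-- A's loop body: update depth on braces, append depth-0 characters.
def pvStepA (st : List Char × Int) (c : Char) : List Char × Int :=
  if c = '{' then (st.1, st.2 + 1)
  else if c = '}' then (st.1, st.2 - 1)
  else if st.2 = 0 then (st.1 ++ [c], st.2)
  else st

def depth0_text_py (text : String) : String :=
  String.ofList (text.toList.foldl pvStepA ([], 0)).1

-- ===== PORT B =====
-- inner loop 1 of B: the maximal brace-free run and the rest (j advances past non-braces)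
def pvRun : List Char → List Char × List Char
  | [] => ([], [])
  | c :: cs =>
      if c = '{' ∨ c = '}' then ([], c :: cs)
      else
        let p := pvRun cs
        (c :: p.1, p.2)

-- inner loop 2 of B: consume chars while bal ≠ 0, updating bal on braces
def pvSkip : List Char → Int → List Char
  | [], _ => []
  | c :: cs, bal =>
      if bal = 0 then c :: cs
      else pvSkip cs (bal + (if c = '{' then 1 else if c = '}' then -1 else 0))

lemma pvRun_snd_length_le (cs : List Char) : (pvRun cs).2.length ≤ cs.length := by
  induction cs with
  | nil => simp [pvRun]
  | cons c cs ih =>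
      simp only [pvRun]
      split
      · simp
      · simpa using Nat.le_succ_of_le ih

lemma pvSkip_length_le (cs : List Char) : ∀ bal, (pvSkip cs bal).length ≤ cs.length := by
  induction cs with
  | nil => intro bal; simp [pvSkip]
  | cons c cs ih =>
      intro bal
      simp only [pvSkip]
      split
      · simp
      · exact Nat.le_succ_of_le (ih _)

-- outer while loop of B
def pvCopy (cs : List Char) : List Char :=
  match h : pvRun cs with
  | (run, []) => run
  | (run, b :: rest) =>
      run ++ pvCopy (pvSkip rest (if b = '{' then 1 else -1))
termination_by cs.length
decreasing_by
  have h2 : (pvRun cs).2 = b :: rest := by rw [h]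
  have hle := pvRun_snd_length_le cs
  rw [h2] at hle
  exact Nat.lt_of_le_of_lt (pvSkip_length_le rest _) (by simp at hle; omega)

def depth0_text_py_alt (text : String) : String :=
  String.ofList (pvCopy text.toList)

-- ===== PRECONDITION & SPEC =====
def Spec_depth0_text_py (text : String) (out : String) : Prop := out = depth0_text_py_alt text
instance (text : String) (out : String) : Decidable (Spec_depth0_text_py text out) := by unfold Spec_depth0_text_py; infer_instance

-- ===== CLAIM (what is proved, stated in full; the proofs are below) =====
def Claim_equal_depth0_text_py : Prop := ∀ (text : String), Dom_depth0_text_py text → Spec_depth0_text_py text (depth0_text_py text)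

-- ===== LEMMAS AND PROOFS =====
lemma pvRun_split (cs : List Char) : cs = (pvRun cs).1 ++ (pvRun cs).2 := by
  induction cs with
  | nil => simp [pvRun]
  | cons c cs ih =>
      simp only [pvRun]
      split
      · simp
      · simpa using ih

lemma pvRun_fst_no_brace (cs : List Char) :
    ∀ c ∈ (pvRun cs).1, ¬ (c = '{' ∨ c = '}') := by
  induction cs with
  | nil => simp [pvRun]
  | cons c cs ih =>
      simp only [pvRun]
      split
      · simp
      · intro x hx
        rcases List.mem_cons.mp hx with h | h
        · subst h; assumption
        · exact ih x h

lemma pvRun_snd_head (cs : List Char) (b : Char) (rest : List Char)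
    (h : (pvRun cs).2 = b :: rest) : b = '{' ∨ b = '}' := by
  induction cs with
  | nil => simp [pvRun] at h
  | cons c cs ih =>
      simp only [pvRun] at h
      split at h
      next hbr =>
        simp only at h
        rcases (List.cons.injEq c cs b rest).mp h with ⟨h1, _⟩
        subst h1; exact hbr
      next => exact ih h

-- a brace-free run at depth 0 is appended verbatim by A's loop
lemma foldA_run (run : List Char) : ∀ acc, (∀ c ∈ run, ¬ (c = '{' ∨ c = '}')) →
    run.foldl pvStepA (acc, 0) = (acc ++ run, 0) := by
  induction run with
  | nil => simp
  | cons c cs ih =>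
      intro acc h
      have hc := h c List.mem_cons_self
      push_neg at hc
      have hstep : pvStepA (acc, 0) c = (acc ++ [c], 0) := by
        simp [pvStepA, hc.1, hc.2]
      rw [List.foldl_cons, hstep, ih (acc ++ [c]) (fun x hx => h x (List.mem_cons_of_mem _ hx))]
      simp

-- while the depth is nonzero, A's loop appends nothing: fast-forward to pvSkip
lemma foldA_skip (cs : List Char) : ∀ (bal : Int) (acc : List Char), bal ≠ 0 →
    (cs.foldl pvStepA (acc, bal)).1 = ((pvSkip cs bal).foldl pvStepA (acc, 0)).1 := by
  induction cs with
  | nil => intro bal acc h; simp [pvSkip]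
  | cons c cs ih =>
      intro bal acc h
      have hstep : pvStepA (acc, bal) c =
          (acc, bal + (if c = '{' then 1 else if c = '}' then -1 else 0)) := by
        by_cases h1 : c = '{'
        · simp [pvStepA, h1]
        · by_cases h2 : c = '}'
          · simp [pvStepA, h2, sub_eq_add_neg]
          · simp [pvStepA, h1, h2, h]
      rw [List.foldl_cons, hstep]
      simp only [pvSkip, if_neg h]
      by_cases h2 : bal + (if c = '{' then 1 else if c = '}' then -1 else 0) = 0
      · rw [h2]
        cases cs <;> simp [pvSkip]
      · exact ih _ acc h2

-- main invariant (strong induction on the length): A's loop from depth 0 produces B's pvCopy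
lemma foldA_copy_aux : ∀ (n : Nat) (cs : List Char), cs.length ≤ n → ∀ acc : List Char,
    (cs.foldl pvStepA (acc, 0)).1 = acc ++ pvCopy cs := by
  intro n
  induction n with
  | zero =>
      intro cs hcs acc
      have hnil : cs = [] := List.length_eq_zero_iff.mp (Nat.le_zero.mp hcs)
      subst hnil
      simp [pvCopy, pvRun]
  | succ n ih =>
      intro cs hcs acc
      rw [pvCopy]
      split
      case _ run hrun =>
        have hsplit := pvRun_split cs
        rw [hrun] at hsplit
        simp only [List.append_nil] at hsplit
        have hnb : ∀ c ∈ run, ¬ (c = '{' ∨ c = '}') := by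
          intro c hc
          exact pvRun_fst_no_brace cs c (by rw [hrun]; exact hc)
        rw [hsplit, foldA_run run acc hnb]
      case _ run b rest hrun =>
        have hsplit := pvRun_split cs
        rw [hrun] at hsplit
        have hb : b = '{' ∨ b = '}' := pvRun_snd_head cs b rest (by rw [hrun])
        have hnb : ∀ c ∈ run, ¬ (c = '{' ∨ c = '}') := by
          intro c hc
          exact pvRun_fst_no_brace cs c (by rw [hrun]; exact hc)
        rw [hsplit, List.foldl_append, foldA_run run acc hnb, List.foldl_cons]
        have hstep : pvStepA (acc ++ run, 0) b = (acc ++ run, if b = '{' then 1 else -1) := by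
          rcases hb with hb | hb <;> simp [pvStepA, hb]
        rw [hstep]
        have hbal : (if b = '{' then (1 : Int) else -1) ≠ 0 := by split <;> omega
        rw [foldA_skip rest _ (acc ++ run) hbal]
        have hlen : (pvSkip rest (if b = '{' then 1 else -1)).length ≤ n := by
          have h1 : cs.length = run.length + rest.length + 1 := by
            rw [hsplit]; simp; omega
          have h2 := pvSkip_length_le rest (if b = '{' then 1 else -1)
          omega
        rw [ih (pvSkip rest (if b = '{' then 1 else -1)) hlen (acc ++ run)]
        simp

theorem foldA_copy (cs : List Char) (acc : List Char) :
    (cs.foldl pvStepA (acc, 0)).1 = acc ++ pvCopy cs :=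
  foldA_copy_aux cs.length cs le_rfl acc

-- ===== VERDICT (by name: the statement is the Claim_ definition above) =====
theorem depth0_text_py_spec : Claim_equal_depth0_text_py := by
  intro text _
  unfold Spec_depth0_text_py depth0_text_py depth0_text_py_alt
  rw [foldA_copy]
  simp
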